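-- pv_equiv track=rewrite | github.com/laracmv/Academia-Python | revisao/ai/primosgemeos.py | gerar_primos_gemeos
-- ===== SOURCE A (Python) =====
-- def eh_primo(num):
--     if num < 2:
--         return False
--     for i in range(2, int(num**0.5) + 1):
--         if num % i == 0:
--             return False
--     return True
--
-- def gerar_primos_gemeos(n):
--     primos_gemeos = []
--     num = 3  # Começando a busca a partir do primeiro primo gêmeo (3, 5)
--
--     while len(primos_gemeos) < n:
--         if eh_primo(num) and eh_primo(num + 2):
--             primos_gemeos.append((num, num + 2))
--         num += 2
--
--     return primos_gemeos
-- ===== SOURCE B (Python) =====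
-- def _primo_por_lista(m, primos):
--     # primos holds, in increasing order, every prime below the current candidate
--     for p in primos:
--         if p * p > m:
--             return True
--         if m % p == 0:
--             return False
--     return True
--
-- def gerar_primos_gemeos(n):
--     primos_gemeos = []
--     primos = [2]  # all primes found so far, in increasing order
--     cand = 3
--     while len(primos_gemeos) < n:
--         if _primo_por_lista(cand, primos):
--             if _primo_por_lista(cand + 2, primos):
--                 primos_gemeos.append((cand, cand + 2))
--             primos.append(cand)
--         cand += 2
--     return primos_gemeos
-- ===== Notes on version B (the rewrite author's own statement) =====
-- stated objective: faster
-- what changed: B maintains an increasing list of all primes found so far and tests each candidate by trial division against those primes only (stopping at p*p > m), instead of A's per-candidate trial division by every integer up to sqrt.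
import Mathlib
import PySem

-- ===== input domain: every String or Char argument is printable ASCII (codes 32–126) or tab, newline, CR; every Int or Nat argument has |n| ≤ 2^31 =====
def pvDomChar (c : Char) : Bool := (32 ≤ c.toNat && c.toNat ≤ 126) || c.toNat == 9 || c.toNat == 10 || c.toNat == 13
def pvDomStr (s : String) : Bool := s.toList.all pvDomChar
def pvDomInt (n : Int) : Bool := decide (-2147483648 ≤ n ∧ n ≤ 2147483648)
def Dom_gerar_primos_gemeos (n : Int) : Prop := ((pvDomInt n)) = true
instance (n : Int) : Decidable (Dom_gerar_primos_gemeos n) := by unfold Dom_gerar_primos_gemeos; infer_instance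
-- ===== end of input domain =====

-- B replaces A's per-candidate trial division by ALL integers up to sqrt with trial division by the
-- primes found so far (kept in an increasing list), which is measurably faster; return values are equal.

-- ===== PORT A =====
-- eh_primo: int(num**0.5) is ported as Nat.sqrt (exact for the integers reached here);
-- range(2, s+1) has s-1 elements; the early-return loop is the short-circuit `all` over the same tests.
def ehPrimo (num : Int) : Bool :=
  if num < 2 then false
  else (List.range' 2 (Nat.sqrt num.toNat - 1)).all (fun i => num % (i : Int) != 0)

-- the unbounded `while len(...) < n` loop, with a fuel bound (2^50 candidates) far beyond
-- anything the Python program could ever scan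
def gppLoopA (n : Int) : Nat → Int → List (Int × Int) → List (Int × Int)
  | 0, _, acc => acc
  | fuel + 1, num, acc =>
    if (acc.length : Int) < n then
      gppLoopA n fuel (num + 2)
        (if ehPrimo num && ehPrimo (num + 2) then acc ++ [(num, num + 2)] else acc)
    else acc

def gerar_primos_gemeos (n : Int) : List (Int × Int) := gppLoopA n 1125899906842624 3 []

-- ===== PORT B =====
def primoPorLista (m : Int) : List Int → Bool
  | [] => true
  | p :: ps => if p * p > m then true else if m % p == 0 then false else primoPorLista m ps

-- same fuel bound for B's unbounded while-loop
def gppLoopB (n : Int) : Nat → Int → List Int → List (Int × Int) → List (Int × Int)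
  | 0, _, _, acc => acc
  | fuel + 1, cand, primos, acc =>
    if (acc.length : Int) < n then
      if primoPorLista cand primos then
        gppLoopB n fuel (cand + 2) (primos ++ [cand])
          (if primoPorLista (cand + 2) primos then acc ++ [(cand, cand + 2)] else acc)
      else gppLoopB n fuel (cand + 2) primos acc
    else acc

def gerar_primos_gemeos_alt (n : Int) : List (Int × Int) := gppLoopB n 1125899906842624 3 [2] []

-- ===== PRECONDITION & SPEC =====
def Spec_gerar_primos_gemeos (n : Int) (out : List (Int × Int)) : Prop := out = gerar_primos_gemeos_alt n
instance (n : Int) (out : List (Int × Int)) : Decidable (Spec_gerar_primos_gemeos n out) := by unfold Spec_gerar_primos_gemeos; infer_instance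

-- ===== CLAIM (what is proved, stated in full; the proofs are below) =====
def Claim_equal_gerar_primos_gemeos : Prop := ∀ (n : Int), Dom_gerar_primos_gemeos n → Spec_gerar_primos_gemeos n (gerar_primos_gemeos n)

-- ===== LEMMAS AND PROOFS =====

theorem int_mod_toNat (m : Int) (i : ℕ) (hm : 0 ≤ m) :
    m % (i : Int) = ((m.toNat % i : ℕ) : Int) := by
  conv_lhs => rw [← Int.toNat_of_nonneg hm]
  push_cast
  ring


theorem ehPrimo_iff (m : Int) (hm : 2 ≤ m) : ehPrimo m = true ↔ Nat.Prime m.toNat := by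
  have hmn : 2 ≤ m.toNat := by omega
  have hs1 : 1 ≤ Nat.sqrt m.toNat := Nat.le_sqrt.mpr (by omega)
  rw [ehPrimo, if_neg (by omega), List.all_eq_true, Nat.prime_def_le_sqrt]
  constructor
  · intro h
    refine ⟨hmn, fun i h2i hile hdvd => ?_⟩
    have hmem : i ∈ List.range' 2 (Nat.sqrt m.toNat - 1) := List.mem_range'_1.mpr (by omega)
    have hi := h i hmem
    rw [bne_iff_ne] at hi
    apply hi
    rw [int_mod_toNat m i (by omega), Int.natCast_eq_zero]
    exact (Nat.dvd_iff_mod_eq_zero ..).mp hdvd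
  · rintro ⟨-, hp⟩ i hmem
    rw [List.mem_range'_1] at hmem
    rw [bne_iff_ne]
    intro h0
    rw [int_mod_toNat m i (by omega), Int.natCast_eq_zero] at h0
    exact hp i (by omega) (by omega) ((Nat.dvd_iff_mod_eq_zero ..).mpr h0)


theorem primoPorLista_iff (m : Int) (hm : 2 ≤ m) (primos : List Int)
    (hsort : primos.Pairwise (· < ·))
    (hprime : ∀ p ∈ primos, 2 ≤ p ∧ Nat.Prime p.toNat)
    (hcomp : ∀ q : ℕ, q.Prime → q ∣ m.toNat → (q : Int) * q ≤ m → (q : Int) ∈ primos) :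
    primoPorLista m primos = true ↔ Nat.Prime m.toNat := by
  have hmcast : ((m.toNat : ℕ) : Int) = m := Int.toNat_of_nonneg (by omega)
  induction primos with
  | nil =>
    simp only [primoPorLista, true_iff]
    by_contra hnp
    have hq := Nat.minFac_prime (show m.toNat ≠ 1 by omega)
    have hd := Nat.minFac_dvd m.toNat
    have hsq : (m.toNat.minFac : Int) * m.toNat.minFac ≤ m := by
      have := Nat.minFac_sq_le_self (show 0 < m.toNat by omega) hnp
      rw [pow_two] at this
      calc ((m.toNat.minFac : Int)) * m.toNat.minFac
          = ((m.toNat.minFac * m.toNat.minFac : ℕ) : Int) := by push_cast; ring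
        _ ≤ ((m.toNat : ℕ) : Int) := Int.ofNat_le.mpr this
        _ = m := hmcast
    exact absurd (hcomp _ hq hd hsq) (List.not_mem_nil)
  | cons p ps ih =>
    obtain ⟨hp2, hpP⟩ := hprime p List.mem_cons_self
    by_cases h1 : p * p > m
    · rw [show primoPorLista m (p :: ps) = true by
        simp only [primoPorLista]; rw [if_pos h1]]
      simp only [true_iff]
      by_contra hnp
      have hq := Nat.minFac_prime (show m.toNat ≠ 1 by omega)
      have hd := Nat.minFac_dvd m.toNat
      have hsq : (m.toNat.minFac : Int) * m.toNat.minFac ≤ m := by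
        have := Nat.minFac_sq_le_self (show 0 < m.toNat by omega) hnp
        rw [pow_two] at this
        calc ((m.toNat.minFac : Int)) * m.toNat.minFac
            = ((m.toNat.minFac * m.toNat.minFac : ℕ) : Int) := by push_cast; ring
          _ ≤ ((m.toNat : ℕ) : Int) := Int.ofNat_le.mpr this
          _ = m := hmcast
      rcases List.mem_cons.mp (hcomp _ hq hd hsq) with h | h
      · rw [← h] at h1; linarith
      · have hlt : p < (m.toNat.minFac : Int) := (List.pairwise_cons.mp hsort).1 _ h
        nlinarith
    · rw [not_lt] at h1
      by_cases h2 : m % p = 0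
      · rw [show primoPorLista m (p :: ps) = false by
          simp only [primoPorLista]; rw [if_neg (by omega), if_pos (by simpa using h2)]]
        simp only [Bool.false_eq_true, false_iff]
        intro hp'
        have hd : p.toNat ∣ m.toNat := by
          have h2' := h2
          rw [show p = ((p.toNat : ℕ) : Int) from (Int.toNat_of_nonneg (by omega)).symm,
            int_mod_toNat m p.toNat (by omega), Int.natCast_eq_zero] at h2'
          exact (Nat.dvd_iff_mod_eq_zero ..).mpr h2'
        rcases hp'.eq_one_or_self_of_dvd _ hd with h | h
        · omega
        · have hpm : p = m := by omega
          nlinarith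
      · rw [show primoPorLista m (p :: ps) = primoPorLista m ps by
          simp only [primoPorLista]; rw [if_neg (by omega), if_neg (by simpa using h2)]]
        apply ih (List.Pairwise.of_cons hsort) (fun q hq => hprime q (List.mem_cons_of_mem _ hq))
        intro q hqP hqd hqle
        rcases List.mem_cons.mp (hcomp q hqP hqd hqle) with h | h
        · exfalso
          apply h2
          rw [← h, int_mod_toNat m q (by omega), Int.natCast_eq_zero]
          exact (Nat.dvd_iff_mod_eq_zero ..).mp hqd
        · exact h


theorem gppLoop_eq (n : Int) : ∀ (fuel : Nat) (c : Int) (primos : List Int) (acc : List (Int × Int)),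
    3 ≤ c → c % 2 = 1 →
    primos.Pairwise (· < ·) →
    (∀ p ∈ primos, 2 ≤ p ∧ p < c ∧ Nat.Prime p.toNat) →
    (∀ q : ℕ, q.Prime → (q : Int) < c → (q : Int) ∈ primos) →
    gppLoopA n fuel c acc = gppLoopB n fuel c primos acc := by
  intro fuel
  induction fuel with
  | zero => intros; rfl
  | succ f ih =>
    intro c primos acc h3 hodd hsort hprime hcomp
    simp only [gppLoopA, gppLoopB]
    by_cases hlen : (acc.length : Int) < n
    · rw [if_pos hlen, if_pos hlen]
      -- divisor-completeness for c and c+2: any prime q with q*q ≤ c+2 is below c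
      have hsmall : ∀ q : ℕ, q.Prime → (q : Int) * q ≤ c + 2 → (q : Int) < c := by
        intro q hq hle
        have h2q : (2 : Int) ≤ q := by exact_mod_cast hq.two_le
        nlinarith
      have hEc : primoPorLista c primos = ehPrimo c := by
        rw [Bool.eq_iff_iff,
          primoPorLista_iff c (by omega) primos hsort
            (fun p hp => ⟨(hprime p hp).1, (hprime p hp).2.2⟩)
            (fun q hq _ hle => hcomp q hq (hsmall q hq (by linarith))),
          ehPrimo_iff c (by omega)]
      have hEc2 : primoPorLista (c + 2) primos = ehPrimo (c + 2) := by
        rw [Bool.eq_iff_iff,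
          primoPorLista_iff (c + 2) (by omega) primos hsort
            (fun p hp => ⟨(hprime p hp).1, (hprime p hp).2.2⟩)
            (fun q hq _ hle => hcomp q hq (hsmall q hq hle)),
          ehPrimo_iff (c + 2) (by omega)]
      -- any prime q with q < c+2 but not q < c must be c itself (c+1 is even)
      have hnotmid : ∀ q : ℕ, q.Prime → (q : Int) = c + 1 → False := by
        intro q hq hqe
        have hq2 : q % 2 = 0 := by omega
        rcases hq.eq_one_or_self_of_dvd 2 (Nat.dvd_of_mod_eq_zero hq2) with h | h <;> omega
      cases hc : ehPrimo c with
      | false =>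
        rw [hEc, hc]
        simp only [Bool.false_and, Bool.false_eq_true, if_false]
        apply ih (c + 2) primos _ (by omega) (by omega) hsort
          (fun p hp => ⟨(hprime p hp).1, by have := (hprime p hp).2.1; omega, (hprime p hp).2.2⟩)
        intro q hq hlt
        rcases show (q : Int) < c ∨ (q : Int) = c ∨ (q : Int) = c + 1 by omega with h | h | h
        · exact hcomp q hq h
        · exfalso
          have hnp : ¬ Nat.Prime c.toNat := by
            rw [← ehPrimo_iff c (by omega)]
            simp [hc]
          exact hnp (by rwa [show c.toNat = q by omega])
        · exact absurd h (by intro h'; exact hnotmid q hq h')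
      | true =>
        rw [hEc, hc]
        simp only [Bool.true_and]
        rw [hEc2]
        apply ih (c + 2) (primos ++ [c]) _ (by omega) (by omega)
        · rw [List.pairwise_append]
          exact ⟨hsort, List.pairwise_singleton _ _,
            fun a ha b hb => by simp at hb; subst hb; exact (hprime a ha).2.1⟩
        · intro p hp
          rcases List.mem_append.mp hp with h | h
          · exact ⟨(hprime p h).1, by have := (hprime p h).2.1; omega, (hprime p h).2.2⟩
          · have hpc : p = c := by simpa using h
            exact ⟨by omega, by omega, by
              rw [hpc]; exact (ehPrimo_iff c (by omega)).mp hc⟩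
        · intro q hq hlt
          rcases show (q : Int) < c ∨ (q : Int) = c ∨ (q : Int) = c + 1 by omega with h | h | h
          · exact List.mem_append.mpr (Or.inl (hcomp q hq h))
          · exact List.mem_append.mpr (Or.inr (by simp [h]))
          · exact absurd h (by intro h'; exact hnotmid q hq h')
    · rw [if_neg hlen, if_neg hlen]

-- ===== VERDICT (by name: the statement is the Claim_ definition above) =====
theorem gerar_primos_gemeos_spec : Claim_equal_gerar_primos_gemeos := by
  intro n _
  unfold Spec_gerar_primos_gemeos gerar_primos_gemeos gerar_primos_gemeos_alt
  apply gppLoop_eq n _ 3 [2] [] (by norm_num) (by norm_num)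
  · exact List.pairwise_singleton _ _
  · intro p hp
    simp only [List.mem_singleton] at hp
    subst hp
    exact ⟨by norm_num, by norm_num, Nat.prime_two⟩
  · intro q hq hlt
    have h2 := hq.two_le
    have : q = 2 := by omega
    subst this
    simp
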